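-- pv_equiv track=rewrite | github.com/vm7608/AI-Research | 04_Leetcode/2280.py | minimumLines
-- ===== SOURCE A (Python) =====
-- from typing import List
--
-- def minimumLines(stockPrices: List[List[int]]) -> int:
--     stockPrices.sort(key=lambda x: x[0])
--     n = len(stockPrices)
--
--     if n == 1:
--         return 0
--
--     ans = 1  # n >= 2 so we need at least 1 line
--     for i in range(1, n-1):
--         day_diff1 = stockPrices[i][0] - stockPrices[i-1][0]
--         price_diff1 = stockPrices[i][1] - stockPrices[i-1][1]
--         day_diff2 = stockPrices[i+1][0] - stockPrices[i][0]
--         price_diff2 = stockPrices[i+1][1] - stockPrices[i][1]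
--         # calculate the ratio of day_diff and price_diff
--         if day_diff1 * price_diff2 != day_diff2 * price_diff1:
--             ans += 1
--     return ans
-- ===== SOURCE B (Python) =====
-- def minimumLines(stockPrices):
--     stockPrices.sort(key=lambda x: x[0])
--     if len(stockPrices) <= 1:
--         return 0
--     segs = [(b[0] - a[0], b[1] - a[1]) for a, b in zip(stockPrices, stockPrices[1:])]
--
--     def lines(lo, hi):
--         # number of lines needed for the consecutive segments segs[lo:hi] (hi - lo >= 1)
--         if hi - lo == 1:
--             return 1
--         mid = (lo + hi) // 2
--         joined = segs[mid - 1][0] * segs[mid][1] == segs[mid][0] * segs[mid - 1][1]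
--         return lines(lo, mid) + lines(mid, hi) - (1 if joined else 0)
--
--     return lines(0, len(segs))
-- ===== Notes on version B (the rewrite author's own statement) =====
-- stated objective: alternative
-- what changed: A walks the sorted points with one index loop, testing each adjacent pair of segments by cross-multiplication and incrementing a counter; B first materialises the list of consecutive difference vectors and then counts lines by divide-and-conquer over that list: lines(lo,hi) = lines(lo,mid) + lines(mid,hi), minus one when the two halves join along the same line at mid.
-- intended difference: On the empty list A returns 1 (its loop-default answer) although there are zero points and hence zero lines; B returns the intended 0. — e.g. on minimumLines([]): A returns 1, B returns 0
-- outside the precondition, e.g. on minimumLines([[1], [92]]): A returns 1, B raises IndexError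
import Mathlib
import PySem

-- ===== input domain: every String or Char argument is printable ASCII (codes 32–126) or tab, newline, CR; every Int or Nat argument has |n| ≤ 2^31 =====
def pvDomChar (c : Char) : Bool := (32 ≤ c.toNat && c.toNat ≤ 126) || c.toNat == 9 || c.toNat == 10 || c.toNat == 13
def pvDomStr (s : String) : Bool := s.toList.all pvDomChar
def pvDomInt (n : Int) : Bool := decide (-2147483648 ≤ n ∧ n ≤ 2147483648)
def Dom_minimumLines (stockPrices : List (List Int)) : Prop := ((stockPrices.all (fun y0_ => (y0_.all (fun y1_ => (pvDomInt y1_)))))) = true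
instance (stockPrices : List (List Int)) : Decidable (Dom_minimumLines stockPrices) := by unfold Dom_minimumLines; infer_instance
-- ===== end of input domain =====

-- B replaces A's single index loop (adjacent-segment cross test with a running counter) by a
-- divide-and-conquer over the precomputed difference-vector list (objective: alternative).
-- Both A and B sort the argument in place in Python; the equivalence proved here is about the
-- RETURN value (the mutation is identical in A and B).

-- ===== PORT A =====
def minimumLines (stockPrices : List (List Int)) : Int :=
  let sp := PySem.List.sorted stockPrices (fun x => PySem.List.pyGetD x 0 0)
  let n : Int := sp.length
  if n = 1 then 0
  else
    (PySem.List.pyRange 1 (n - 1) 1).foldl (fun ans i =>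
      let dayDiff1 := PySem.List.pyGetD (PySem.List.pyGetD sp i []) 0 0 -
                      PySem.List.pyGetD (PySem.List.pyGetD sp (i - 1) []) 0 0
      let priceDiff1 := PySem.List.pyGetD (PySem.List.pyGetD sp i []) 1 0 -
                        PySem.List.pyGetD (PySem.List.pyGetD sp (i - 1) []) 1 0
      let dayDiff2 := PySem.List.pyGetD (PySem.List.pyGetD sp (i + 1) []) 0 0 -
                      PySem.List.pyGetD (PySem.List.pyGetD sp i []) 0 0
      let priceDiff2 := PySem.List.pyGetD (PySem.List.pyGetD sp (i + 1) []) 1 0 -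
                        PySem.List.pyGetD (PySem.List.pyGetD sp i []) 1 0
      if dayDiff1 * priceDiff2 ≠ dayDiff2 * priceDiff1 then ans + 1 else ans) 1

-- ===== PORT B =====
-- B's `joined` test at a midpoint: do the segments mid-1 and mid lie along the same line?
def joinedAt (segs : List (Int × Int)) (mid : Int) : Bool :=
  let s1 := PySem.List.pyGetD segs (mid - 1) (0, 0)
  let s2 := PySem.List.pyGetD segs mid (0, 0)
  s1.1 * s2.2 == s2.1 * s1.2

-- B's recursive `lines(lo, hi)`; the fuel argument only makes the recursion structural
-- (every actual call has 1 ≤ hi - lo ≤ fuel, so the fuel never runs out).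
def linesRec : Nat → List (Int × Int) → Int → Int → Int
  | 0, _, _, _ => 1
  | f + 1, segs, lo, hi =>
    if hi - lo = 1 then 1
    else
      let mid := PySem.Int.floordiv (lo + hi) 2
      linesRec f segs lo mid + linesRec f segs mid hi -
        (if joinedAt segs mid then 1 else 0)

def minimumLines_alt (stockPrices : List (List Int)) : Int :=
  let sp := PySem.List.sorted stockPrices (fun x => PySem.List.pyGetD x 0 0)
  if sp.length ≤ 1 then 0
  else
    let segs := (sp.zip (PySem.List.slice sp (some 1) none)).map
      (fun ab => (PySem.List.pyGetD ab.2 0 0 - PySem.List.pyGetD ab.1 0 0,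
                  PySem.List.pyGetD ab.2 1 0 - PySem.List.pyGetD ab.1 1 0))
    linesRec (segs.length + 1) segs 0 (segs.length : Int)

-- ===== PRECONDITION & SPEC =====
-- Pre_ excludes inputs whose points lack a day coordinate, or (with ≥ 2 points) a price
-- coordinate: there Python A raises IndexError — except with exactly two points, where
-- A's loop body never runs and A returns 1 while B, which reads the price coordinates
-- to build the difference vector of the single segment, itself raises IndexError.
def Pre_minimumLines (stockPrices : List (List Int)) : Prop :=
  ∀ p ∈ stockPrices, 1 ≤ p.length ∧ (2 ≤ stockPrices.length → 2 ≤ p.length)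
instance (stockPrices : List (List Int)) : Decidable (Pre_minimumLines stockPrices) := by
  unfold Pre_minimumLines; infer_instance

def pvWitness_minimumLines : List (List Int) := [[3, 4], [1, 2], [2, 7]]

-- On the empty list A returns 1 (its loop default) although there are zero points and
-- zero lines; B returns the intended 0.
def D_minimumLines (stockPrices : List (List Int)) : Prop := stockPrices = []
instance (stockPrices : List (List Int)) : Decidable (D_minimumLines stockPrices) := by
  unfold D_minimumLines; infer_instance

def Spec_minimumLines (stockPrices : List (List Int)) (out : Int) : Prop :=
  ¬ D_minimumLines stockPrices → out = minimumLines_alt stockPrices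
instance (stockPrices : List (List Int)) (out : Int) : Decidable (Spec_minimumLines stockPrices out) := by
  unfold Spec_minimumLines; infer_instance

def pvDiffWitness_minimumLines : List (List Int) := []
def pvDiffWitnessOut_minimumLines : Int × Int := (1, 0)

-- ===== CLAIM (what is proved, stated in full; the proofs are below) =====
def Claim_unchanged_minimumLines : Prop := ∀ (stockPrices : List (List Int)), Dom_minimumLines stockPrices → Pre_minimumLines stockPrices → Spec_minimumLines stockPrices (minimumLines stockPrices)
def Claim_changed_minimumLines : Prop := Dom_minimumLines (pvDiffWitness_minimumLines) ∧ Pre_minimumLines (pvDiffWitness_minimumLines) ∧ D_minimumLines (pvDiffWitness_minimumLines) ∧ minimumLines (pvDiffWitness_minimumLines) = pvDiffWitnessOut_minimumLines.1 ∧ minimumLines_alt (pvDiffWitness_minimumLines) = pvDiffWitnessOut_minimumLines.2 ∧ pvDiffWitnessOut_minimumLines.1 ≠ pvDiffWitnessOut_minimumLines.2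
def Claim_exact_minimumLines : Prop := ∀ (stockPrices : List (List Int)), Dom_minimumLines stockPrices → Pre_minimumLines stockPrices → D_minimumLines stockPrices → minimumLines stockPrices ≠ minimumLines_alt stockPrices

-- ===== LEMMAS AND PROOFS =====

-- number of joined adjacent segment pairs with split index strictly inside (lo, hi)
def J (segs : List (Int × Int)) (lo hi : Int) : Int :=
  ((List.range (hi - lo - 1).toNat).countP (fun k : Nat => joinedAt segs (lo + 1 + (k : Int))) : Int)

lemma J_split (segs : List (Int × Int)) (lo mid hi : Int)
    (h1 : lo < mid) (h2 : mid < hi) :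
    J segs lo hi = J segs lo mid + (if joinedAt segs mid then 1 else 0) + J segs mid hi := by
  unfold J
  have ha : (hi - lo - 1).toNat = (mid - lo - 1).toNat + (1 + (hi - mid - 1).toNat) := by omega
  have h1' : List.range (1 + (hi - mid - 1).toNat)
      = List.range 1 ++ (List.range (hi - mid - 1).toNat).map (1 + ·) := List.range_add ..
  rw [ha, List.range_add, List.countP_append, List.countP_map, h1', List.countP_append,
      List.countP_map]
  have e2 : List.countP (((fun k : Nat => joinedAt segs (lo + 1 + (k : Int))) ∘
        fun x => (mid - lo - 1).toNat + x) ∘ fun x => 1 + x) (List.range (hi - mid - 1).toNat)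
      = List.countP (fun k : Nat => joinedAt segs (mid + 1 + (k : Int)))
          (List.range (hi - mid - 1).toNat) := by
    apply List.countP_congr
    intro k _
    simp only [Function.comp_apply]
    have hx : lo + 1 + (((mid - lo - 1).toNat + (1 + k) : Nat) : Int) = mid + 1 + (k : Int) := by
      omega
    rw [hx]
  rw [e2]
  have emid : List.countP ((fun k : Nat => joinedAt segs (lo + 1 + (k : Int))) ∘
        fun x => (mid - lo - 1).toNat + x) (List.range 1)
      = if joinedAt segs mid then 1 else 0 := by
    rw [List.range_one, List.countP_singleton]
    simp only [Function.comp_apply]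
    have hx0 : lo + 1 + (((mid - lo - 1).toNat + 0 : Nat) : Int) = mid := by omega
    simp only [hx0]
  rw [emid]
  split_ifs <;> push_cast <;> ring

lemma linesRec_eq (fuel : Nat) (segs : List (Int × Int)) (lo hi : Int)
    (h1 : 1 ≤ hi - lo) (h2 : (hi - lo).toNat ≤ fuel) :
    linesRec fuel segs lo hi = (hi - lo) - J segs lo hi := by
  induction fuel generalizing lo hi with
  | zero => omega
  | succ f ih =>
    by_cases hone : hi - lo = 1
    · have hJ : J segs lo hi = 0 := by
        unfold J
        have : (hi - lo - 1).toNat = 0 := by omega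
        rw [this]
        simp
      simp only [linesRec, if_pos hone, hJ]
      omega
    · have hmid : lo < PySem.Int.floordiv (lo + hi) 2 ∧ PySem.Int.floordiv (lo + hi) 2 < hi := by
        rw [PySem.Int.floordiv_eq_ediv_of_pos (by norm_num)]
        omega
      simp only [linesRec, if_neg hone]
      rw [ih lo _ (by omega) (by omega), ih _ hi (by omega) (by omega),
          J_split segs lo _ hi hmid.1 hmid.2]
      ring

def ptX (L : List (List Int)) (k : Nat) : Int := PySem.List.pyGetD (L.getD k []) 0 0
def ptY (L : List (List Int)) (k : Nat) : Int := PySem.List.pyGetD (L.getD k []) 1 0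

def segsOf (L : List (List Int)) : List (Int × Int) :=
  (L.zip (PySem.List.slice L (some 1) none)).map
    (fun ab => (PySem.List.pyGetD ab.2 0 0 - PySem.List.pyGetD ab.1 0 0,
                PySem.List.pyGetD ab.2 1 0 - PySem.List.pyGetD ab.1 1 0))

lemma length_segsOf (L : List (List Int)) : (segsOf L).length = L.length - 1 := by
  unfold segsOf
  rw [PySem.List.slice_from_one]
  simp [List.length_zip]

lemma segsOf_getD (L : List (List Int)) (j : Nat) (hj : j + 1 < L.length) :
    PySem.List.pyGetD (segsOf L) (j : Int) (0, 0)
      = (ptX L (j + 1) - ptX L j, ptY L (j + 1) - ptY L j) := by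
  rw [PySem.List.pyGetD_natCast]
  have hlen : j < (segsOf L).length := by rw [length_segsOf]; omega
  rw [List.getD_eq_getElem _ _ hlen]
  unfold segsOf
  simp only [PySem.List.slice_from_one, List.getElem_map, List.getElem_zip, List.getElem_tail]
  unfold ptX ptY
  rw [List.getD_eq_getElem L [] (by omega), List.getD_eq_getElem L [] (by omega)]

lemma joinedAt_segsOf (L : List (List Int)) (k : Nat) (hk : k + 2 < L.length) :
    joinedAt (segsOf L) ((k + 1 : Nat) : Int)
      = decide ((ptX L (k + 1) - ptX L k) * (ptY L (k + 2) - ptY L (k + 1))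
          = (ptX L (k + 2) - ptX L (k + 1)) * (ptY L (k + 1) - ptY L k)) := by
  unfold joinedAt
  rw [show ((k + 1 : Nat) : Int) - 1 = ((k : Nat) : Int) from by push_cast; ring]
  rw [segsOf_getD L k (by omega), segsOf_getD L (k + 1) (by omega)]
  rw [show k + 1 + 1 = k + 2 from rfl]
  exact Bool.beq_eq_decide_eq _ _

lemma foldl_ite_count {α : Type} (P : α → Prop) [DecidablePred P] (l : List α) (a : Int) :
    l.foldl (fun acc x => if P x then acc + 1 else acc) a
      = a + (l.countP (fun x => decide (P x)) : Int) := by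
  simpa using PySem.List.foldl_count_if (fun x => decide (P x)) l a

lemma count_over_range (C : Int → Prop) [DecidablePred C] (m : Nat) (a : Int) :
    ((List.range m).map (fun k => (1:Int) + ↑k)).foldl
        (fun ans i => if C i then ans + 1 else ans) a
      = a + ((List.range m).countP (fun k => decide (C (1 + ↑k))) : Int) := by
  rw [List.foldl_map]
  simpa using foldl_ite_count (fun k : Nat => C (1 + (k:Int))) (List.range m) a

theorem minimumLines_spec : Claim_unchanged_minimumLines := by
  intro sp _ _
  unfold Spec_minimumLines D_minimumLines
  intro hne
  unfold minimumLines minimumLines_alt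
  simp only [PySem.List.length_sorted]
  set L := PySem.List.sorted sp (fun x => PySem.List.pyGetD x 0 0) with hLdef
  have hLlen : L.length = sp.length := PySem.List.length_sorted sp _ _
  have hn1 : 1 ≤ sp.length := by
    cases sp with
    | nil => exact absurd rfl hne
    | cons a t => simp
  rcases Nat.lt_or_ge sp.length 2 with hsmall | h2
  · -- exactly one point: A returns 0 (the n == 1 branch); B returns 0 (the length <= 1 branch)
    have hone : sp.length = 1 := by omega
    rw [if_pos (by rw [hone]; norm_num), if_pos (by omega)]
  · -- at least two points
    rw [if_neg (show ¬ ((sp.length:Int) = 1) from by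
          intro h
          have : sp.length = 1 := by exact_mod_cast h
          omega),
        if_neg (by omega)]
    rw [← hLlen]
    have hsegs : ((L.zip (PySem.List.slice L (some 1) none)).map
        (fun ab => (PySem.List.pyGetD ab.2 0 0 - PySem.List.pyGetD ab.1 0 0,
                    PySem.List.pyGetD ab.2 1 0 - PySem.List.pyGetD ab.1 1 0))) = segsOf L := rfl
    rw [hsegs]
    have hm : (segsOf L).length = L.length - 1 := length_segsOf L
    have hL2 : 2 ≤ L.length := by omega
    -- B's side: the divide-and-conquer equals (#segments) - (#joins)
    rw [linesRec_eq ((segsOf L).length + 1) (segsOf L) 0 ((segsOf L).length : Int)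
         (by omega) (by omega)]
    -- A's side: the loop counts the non-joined interior indices
    rw [PySem.List.pyRange_one,
        show (((L.length : Int) - 1) - 1).toNat = L.length - 2 from by omega]
    rw [count_over_range]
    -- A's per-index test is the negation of B's joinedAt test
    have hcnt : (List.range (L.length - 2)).countP
          (fun k : Nat => decide
            ((PySem.List.pyGetD (PySem.List.pyGetD L (1 + (k:Int)) []) 0 0 -
                PySem.List.pyGetD (PySem.List.pyGetD L (1 + (k:Int) - 1) []) 0 0) *
              (PySem.List.pyGetD (PySem.List.pyGetD L (1 + (k:Int) + 1) []) 1 0 -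
                PySem.List.pyGetD (PySem.List.pyGetD L (1 + (k:Int)) []) 1 0) ≠
              (PySem.List.pyGetD (PySem.List.pyGetD L (1 + (k:Int) + 1) []) 0 0 -
                PySem.List.pyGetD (PySem.List.pyGetD L (1 + (k:Int)) []) 0 0) *
              (PySem.List.pyGetD (PySem.List.pyGetD L (1 + (k:Int)) []) 1 0 -
                PySem.List.pyGetD (PySem.List.pyGetD L (1 + (k:Int) - 1) []) 1 0)))
        = (List.range (L.length - 2)).countP
            (fun k : Nat => ! joinedAt (segsOf L) (1 + (k:Int))) := by
      apply List.countP_congr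
      intro k hk
      have hkb : k < L.length - 2 := List.mem_range.mp hk
      have e0 : (1:Int) + (k:Int) - 1 = ((k : Nat) : Int) := by ring
      have e1 : (1:Int) + (k:Int) = ((k + 1 : Nat) : Int) := by push_cast; ring
      have e2 : (1:Int) + (k:Int) + 1 = ((k + 2 : Nat) : Int) := by push_cast; ring
      rw [e0, e2, e1]
      rw [joinedAt_segsOf L k (by omega)]
      simp only [PySem.List.pyGetD_natCast]
      simp [ptX, ptY]
    rw [hcnt]
    -- evaluate J at the full range
    have hJ : J (segsOf L) 0 ((segsOf L).length : Int)
        = ((List.range (L.length - 2)).countP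
            (fun k : Nat => joinedAt (segsOf L) (1 + (k:Int))) : Int) := by
      unfold J
      rw [show (((segsOf L).length : Int) - 0 - 1).toNat = L.length - 2 from by
            rw [hm]; omega]
      have hfun : (fun k : Nat => joinedAt (segsOf L) (0 + 1 + (k:Int)))
          = (fun k : Nat => joinedAt (segsOf L) (1 + (k:Int))) := by
        funext k; norm_num
      rw [hfun]
    rw [hJ]
    have hA : (List.range (L.length - 2)).countP
          (fun k : Nat => ! joinedAt (segsOf L) (1 + (k:Int)))
        + (List.range (L.length - 2)).countP
          (fun k : Nat => joinedAt (segsOf L) (1 + (k:Int)))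
        = L.length - 2 := by
      have hlen := List.length_eq_countP_add_countP
        (p := fun k : Nat => joinedAt (segsOf L) (1 + (k:Int)))
        (l := List.range (L.length - 2))
      have hnot : (List.range (L.length - 2)).countP
            (fun k : Nat => ! joinedAt (segsOf L) (1 + (k:Int)))
          = (List.range (L.length - 2)).countP
            (fun a : Nat => decide (¬ joinedAt (segsOf L) (1 + (a:Int)) = true)) := by
        apply List.countP_congr
        intro k _
        simp
      rw [List.length_range] at hlen
      omega
    omega

theorem minimumLines_changed : Claim_changed_minimumLines := by
  unfold Claim_changed_minimumLines; decide

theorem minimumLines_tight : Claim_exact_minimumLines := by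
  intro sp _ _ hD
  subst hD
  decide
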